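-- pv_equiv track=rewrite | github.com/Mitch36/Wirecut-QAOA | quantum_utils/src/quantum_utils/quantum_utils.py | FlipBits
-- ===== SOURCE A (Python) =====
-- def FlipBits(binaryStr: str) -> str:
--     """
--     Inverses the bits in a binary string
--
--     Args:
--         binaryStr (str): Binary string to inverse
--
--     Returns:
--         str: Inversed binary string
--
--     Raises:
--         Exception: Invalid parameter: binaryStr; empty string
--         Exception: Invalid character in state: {binaryStr} must be either 0 or 1
--     """
--     binaryArr = list(binaryStr)
--     for i, char in enumerate(binaryArr):
--         if char == "0":
--             binaryArr[i] = "1"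
--         elif char == "1":
--             binaryArr[i] = "0"
--         else:
--             raise Exception("Invalid character in state: " + binaryStr + " must be either 0 or 1")
--     return "".join(binaryArr)
-- ===== SOURCE B (Python) =====
-- def FlipBits(binaryStr: str) -> str:
--     if set(binaryStr) - {"0", "1"}:
--         raise Exception("Invalid character in state: " + binaryStr + " must be either 0 or 1")
--     n = len(binaryStr)
--     if n == 0:
--         return ""
--     return format((1 << n) - 1 - int(binaryStr, 2), "0" + str(n) + "b")
-- ===== Notes on version B (the rewrite author's own statement) =====
-- stated objective: alternative
-- what changed: A validates and flips character by character in one indexed loop; B validates with a set-difference pass, then computes the numeric one's-complement (2^n - 1 - int(s,2)) and formats it back as a zero-padded binary string, so no per-character flip exists anywhere in B.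
import Mathlib
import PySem

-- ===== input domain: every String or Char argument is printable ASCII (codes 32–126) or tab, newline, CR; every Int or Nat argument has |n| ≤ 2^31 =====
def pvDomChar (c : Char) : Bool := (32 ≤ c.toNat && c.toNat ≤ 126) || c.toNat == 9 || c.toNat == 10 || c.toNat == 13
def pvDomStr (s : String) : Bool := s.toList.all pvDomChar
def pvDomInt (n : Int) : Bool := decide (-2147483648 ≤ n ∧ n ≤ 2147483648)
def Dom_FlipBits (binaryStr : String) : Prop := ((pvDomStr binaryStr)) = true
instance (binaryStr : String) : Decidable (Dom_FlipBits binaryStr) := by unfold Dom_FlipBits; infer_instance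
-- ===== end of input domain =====

-- B replaces the per-character flip by the numeric one's-complement 2^n-1 - int(s,2), formatted back at width n; equal to A on all valid binary strings (both raise on others).

-- ===== PORT A =====
-- A's loop over the characters: flip each, none = the raise on an invalid character
def flipLoopA : List Char → Option (List Char)
  | [] => some []
  | c :: cs =>
      if c = '0' then (flipLoopA cs).map (fun r => '1' :: r)
      else if c = '1' then (flipLoopA cs).map (fun r => '0' :: r)
      else none

def FlipBits (binaryStr : String) : String :=
  match flipLoopA binaryStr.toList with
  | some l => String.mk l
  | none => ""   -- unreachable under Pre_ (Python raises here)

-- ===== PORT B =====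
-- set(binaryStr) - {'0','1'}
def invalidSetB (binaryStr : String) : List Char :=
  (PySem.Set.ofList binaryStr.toList).filter (fun c => !(c = '0' || c = '1'))

-- int(binaryStr, 2): the value of the string as a base-2 number
def valB (l : List Char) : Nat :=
  l.foldl (fun a c => 2 * a + (if c = '1' then 1 else 0)) 0

-- format(v, '0nb'): v written in binary, zero-padded to width n (built least-significant digit last)
def binB : Nat → Nat → List Char
  | 0, _ => []
  | n + 1, v => binB n (v / 2) ++ [if v % 2 = 1 then '1' else '0']

def FlipBits_alt (binaryStr : String) : String :=
  if invalidSetB binaryStr ≠ [] then ""   -- unreachable under Pre_ (Python raises here)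
  else if binaryStr.toList.length = 0 then ""
  else String.mk (binB binaryStr.toList.length (2 ^ binaryStr.toList.length - 1 - valB binaryStr.toList))

-- ===== PRECONDITION & SPEC =====
-- Pre_ excludes exactly the strings containing a non-binary character, on which the Python A raises Exception.
def Pre_FlipBits (binaryStr : String) : Prop :=
  binaryStr.toList.all (fun c => c == '0' || c == '1') = true
instance (binaryStr : String) : Decidable (Pre_FlipBits binaryStr) := by unfold Pre_FlipBits; infer_instance

def pvWitness_FlipBits : String := "0110"

def Spec_FlipBits (binaryStr : String) (out : String) : Prop := out = FlipBits_alt binaryStr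
instance (binaryStr : String) (out : String) : Decidable (Spec_FlipBits binaryStr out) := by unfold Spec_FlipBits; infer_instance

-- ===== CLAIM (what is proved, stated in full; the proofs are below) =====
def Claim_equal_FlipBits : Prop := ∀ (binaryStr : String), Dom_FlipBits binaryStr → Pre_FlipBits binaryStr → Spec_FlipBits binaryStr (FlipBits binaryStr)

-- ===== LEMMAS AND PROOFS =====

def flipChar (c : Char) : Char := if c = '0' then '1' else '0'

theorem flipLoopA_valid (l : List Char) (h : ∀ c ∈ l, c = '0' ∨ c = '1') :
    flipLoopA l = some (l.map flipChar) := by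
  induction l with
  | nil => rfl
  | cons c cs ih =>
      have hc := h c (by simp)
      have ihcs := ih (fun x hx => h x (by simp [hx]))
      rcases hc with hc | hc <;> subst hc <;>
        simp [flipLoopA, flipChar, ihcs]

theorem invalidSetB_valid (s : String) (h : ∀ c ∈ s.toList, c = '0' ∨ c = '1') :
    invalidSetB s = [] := by
  unfold invalidSetB
  rw [List.filter_eq_nil_iff]
  intro c hc
  have : c ∈ s.toList := (PySem.Set.mem_ofList (xs := s.toList) (y := c)).mp hc
  rcases h c this with h0 | h0 <;> simp [h0]

theorem valB_append (l : List Char) (c : Char) :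
    valB (l ++ [c]) = 2 * valB l + (if c = '1' then 1 else 0) := by
  simp [valB, List.foldl_append]

theorem valB_lt (l : List Char) : valB l < 2 ^ l.length := by
  induction l using List.reverseRecOn with
  | nil => simp [valB]
  | append_singleton l c ih =>
      rw [valB_append]
      have : (if c = '1' then 1 else 0) ≤ 1 := by split <;> omega
      simp only [List.length_append, List.length_cons, List.length_nil, pow_succ]
      omega

theorem binB_complement (l : List Char) (h : ∀ c ∈ l, c = '0' ∨ c = '1') :
    binB l.length (2 ^ l.length - 1 - valB l) = l.map flipChar := by
  induction l using List.reverseRecOn with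
  | nil => rfl
  | append_singleton l c ih =>
      have hv := valB_lt l
      have hb : (if c = '1' then (1:Nat) else 0) ≤ 1 := by split <;> omega
      have hx : 2 ^ (l.length + 1) - 1 - valB (l ++ [c])
          = 2 * (2 ^ l.length - 1 - valB l) + (1 - (if c = '1' then 1 else 0)) := by
        rw [valB_append]
        simp only [pow_succ]
        omega
      have hlen : (l ++ [c]).length = l.length + 1 := by simp
      rw [hlen, hx, binB]
      have hdiv : (2 * (2 ^ l.length - 1 - valB l) + (1 - (if c = '1' then 1 else 0))) / 2
          = 2 ^ l.length - 1 - valB l := by omega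
      have hmod : (2 * (2 ^ l.length - 1 - valB l) + (1 - (if c = '1' then 1 else 0))) % 2
          = 1 - (if c = '1' then 1 else 0) := by omega
      rw [hdiv, hmod, ih (fun x hx => h x (by simp [hx]))]
      rcases h c (by simp) with hc | hc <;> subst hc <;> simp [flipChar]

-- ===== VERDICT (by name: the statement is the Claim_ definition above) =====
theorem FlipBits_spec : Claim_equal_FlipBits := by
  intro s _ hpre
  have hp : ∀ c ∈ s.toList, c = '0' ∨ c = '1' := by
    intro c hc
    have := List.all_eq_true.mp hpre c hc
    simpa using this
  unfold Spec_FlipBits FlipBits FlipBits_alt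
  rw [flipLoopA_valid s.toList hp, invalidSetB_valid s hp]
  by_cases hn : s.toList.length = 0
  · rcases List.length_eq_zero_iff.mp hn with h0
    simp [h0]
    rfl
  · simp only [ne_eq, not_true_eq_false, if_false, if_neg hn]
    rw [binB_complement s.toList hp]
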